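-- pv_equiv track=rewrite | github.com/openc2e/openc2e | src/tools/gno_dumper.py | parse_rtf
-- ===== SOURCE A (Python) =====
-- import string
--
-- def parse_rtf(s):
--
--     out = ''
--
--     p = 0
--     while p < len(s):
--         if s[p] == '{':
--             p += 1
--
--             if s[p:].startswith('\\fonttbl'):
--                 p += len('\\fonttbl')
--                 num_groups = 0
--                 while p < len(s):
--                     if s[p] == '}' and num_groups == 0:
--                         break
--                     if s[p] == '}':
--                         num_groups -= 1
--                     if s[p] == '{':
--                         num_groups += 1
--                     p += 1
--             elif s[p:].startswith('\\colortbl'):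
--                 p += len('\\colortbl')
--                 num_groups = 0
--                 while p < len(s):
--                     if s[p] == '}' and num_groups == 0:
--                         break
--                     if s[p] == '}':
--                         num_groups -= 1
--                     if s[p] == '{':
--                         num_groups += 1
--                     p += 1
--             elif s[p:].startswith('\\*'):
--                 p += len('\\*')
--                 num_groups = 0
--                 while p < len(s):
--                     if s[p] == '}' and num_groups == 0:
--                         break
--                     if s[p] == '}':
--                         num_groups -= 1
--                     if s[p] == '{':
--                         num_groups += 1
--                     p += 1
--             elif s[p:].startswith('\\pntext'):
--                 p += len('\\pntext')
--                 num_groups = 0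
--                 while p < len(s):
--                     if s[p] == '}' and num_groups == 0:
--                         break
--                     if s[p] == '}':
--                         num_groups -= 1
--                     if s[p] == '{':
--                         num_groups += 1
--                     p += 1
--         elif s[p] == '}':
--             p += 1
--         elif s[p] == '\\':
--             command = ''
--             p += 1
--             while p < len(s) and s[p] in (string.ascii_letters + string.digits + '-'):
--                 command += s[p]
--                 p += 1
--             if command == 'par':
--                 out += '\n'
--         elif s[p] in ('\r', '\n'):
--             # ignore
--             p += 1
--         else:
--             out += s[p]
--             p += 1
--
--     out = out.strip()
--     return "\n".join(line.strip() for line in out.split("\n"))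
-- ===== SOURCE B (Python) =====
-- # Two-phase rewrite: first delete the four special brace groups wholesale,
-- # then a trivial character loop with no table logic; same final whitespace cleanup.
--
-- _SPECIAL = ('\\fonttbl', '\\colortbl', '\\*', '\\pntext')
-- _CMDCHARS = set('abcdefghijklmnopqrstuvwxyzABCDEFGHIJKLMNOPQRSTUVWXYZ0123456789-')
--
--
-- def _strip_special_groups(s):
--     """Copy s, dropping the contents of every special '{...' group (the group's
--     closing '}' is kept, it is inert in phase 2)."""
--     kept = []
--     p = 0
--     n = len(s)
--     while p < n:
--         c = s[p]
--         if c == '{' and s.startswith(_SPECIAL, p + 1):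
--             # skip '{', the prefix, and everything up to the matching depth-0 '}'
--             p += 1
--             depth = 0
--             while p < n:
--                 if s[p] == '}':
--                     if depth == 0:
--                         break
--                     depth -= 1
--                 elif s[p] == '{':
--                     depth += 1
--                 p += 1
--         else:
--             kept.append(c)
--             p += 1
--     return ''.join(kept)
--
--
-- def parse_rtf(s):
--     cleaned = _strip_special_groups(s)
--     out = []
--     p = 0
--     n = len(cleaned)
--     while p < n:
--         c = cleaned[p]
--         p += 1
--         if c == '\\':
--             start = p
--             while p < n and cleaned[p] in _CMDCHARS:
--                 p += 1
--             if cleaned[start:p] == 'par':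
--                 out.append('\n')
--         elif c not in '{}\r\n':
--             out.append(c)
--     text = ''.join(out).strip()
--     return "\n".join(line.strip() for line in text.split("\n"))
-- ===== Notes on version B (the rewrite author's own statement) =====
-- stated objective: simpler
-- what changed: A's single interleaved scan with four duplicated inline skip-group loops is replaced by two passes: a first pass that deletes the special brace groups wholesale producing a cleaned string, then a trivial emit loop over it with no table logic; output is accumulated in a list and joined once instead of A's repeated string concatenation.
import Mathlib
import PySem

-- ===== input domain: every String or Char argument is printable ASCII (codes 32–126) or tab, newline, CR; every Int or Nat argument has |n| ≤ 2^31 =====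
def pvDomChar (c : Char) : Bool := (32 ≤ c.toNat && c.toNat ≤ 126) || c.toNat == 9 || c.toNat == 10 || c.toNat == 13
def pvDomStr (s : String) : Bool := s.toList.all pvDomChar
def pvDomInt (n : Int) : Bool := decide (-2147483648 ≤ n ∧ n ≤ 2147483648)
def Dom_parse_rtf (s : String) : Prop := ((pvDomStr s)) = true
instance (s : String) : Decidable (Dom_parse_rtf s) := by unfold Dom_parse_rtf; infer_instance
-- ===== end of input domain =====

-- B restructures A's single interleaved loop into two passes (delete special groups, then a plain
-- emit loop with no table logic); objective: simpler. Neither version mutates its argument.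

-- ===== PORT A =====
-- A's four identical inner skip loops: scan to the first depth-0 '}' (not consumed) or EOF
def skipA : Int → List Char → List Char
  | _, [] => []
  | d, c :: r =>
    if c = '}' ∧ d = 0 then c :: r
    else skipA (if c = '}' then d - 1 else if c = '{' then d + 1 else d) r

theorem skipA_length_le (d : Int) (x : List Char) : (skipA d x).length ≤ x.length := by
  induction x generalizing d with
  | nil => simp [skipA]
  | cons c r ih =>
    simp only [skipA]
    split
    · simp
    · exact Nat.le_succ_of_le (ih _)

theorem skipA_drop_len (d : Int) (k : Nat) (r : List Char) :
    (skipA d (r.drop k)).length ≤ r.length :=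
  le_trans (skipA_length_le _ _) (by simp [List.length_drop])

-- membership in string.ascii_letters + string.digits + '-'
def cmdCharA (c : Char) : Bool := c.isAlpha || c.isDigit || c = '-'

def loopA : List Char → List Char → List Char
  | out, [] => out
  | out, c :: r =>
    if c = '{' then
      if PySem.Chars.startswith r "\\fonttbl".toList then loopA out (skipA 0 (r.drop 8))
      else if PySem.Chars.startswith r "\\colortbl".toList then loopA out (skipA 0 (r.drop 9))
      else if PySem.Chars.startswith r "\\*".toList then loopA out (skipA 0 (r.drop 2))
      else if PySem.Chars.startswith r "\\pntext".toList then loopA out (skipA 0 (r.drop 7))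
      else loopA out r
    else if c = '}' then loopA out r
    else if c = '\\' then
      loopA (if r.takeWhile cmdCharA = "par".toList then out ++ ['\n'] else out) (r.dropWhile cmdCharA)
    else if c = '\r' ∨ c = '\n' then loopA out r
    else loopA (out ++ [c]) r
  termination_by _ cs => cs.length
  decreasing_by
    all_goals simp only [List.length_cons]
    · exact Nat.lt_succ_of_le (skipA_drop_len _ _ _)
    · exact Nat.lt_succ_of_le (skipA_drop_len _ _ _)
    · exact Nat.lt_succ_of_le (skipA_drop_len _ _ _)
    · exact Nat.lt_succ_of_le (skipA_drop_len _ _ _)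
    · omega
    · omega
    · exact Nat.lt_succ_of_le (List.length_dropWhile_le _ _)
    · omega
    · omega

def parse_rtf (s : String) : String :=
  let out := loopA [] s.toList
  let out := PySem.Chars.strip out
  String.ofList (PySem.Chars.join "\n".toList ((PySem.Chars.splitOn out "\n".toList).map PySem.Chars.strip))

-- ===== PORT B =====
-- Source B's single inner skip loop: scan to the first depth-0 '}' (not consumed) or EOF
def skipB : Int → List Char → List Char
  | _, [] => []
  | d, c :: r =>
    if c = '}' then (if d = 0 then c :: r else skipB (d - 1) r)
    else if c = '{' then skipB (d + 1) r
    else skipB d r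

theorem skipB_length_le (d : Int) (x : List Char) : (skipB d x).length ≤ x.length := by
  induction x generalizing d with
  | nil => simp [skipB]
  | cons c r ih =>
    simp only [skipB]
    split
    · split
      · simp
      · exact Nat.le_succ_of_le (ih _)
    · split
      · exact Nat.le_succ_of_le (ih _)
      · exact Nat.le_succ_of_le (ih _)

-- s.startswith(_SPECIAL, p+1)
def isSpecial (r : List Char) : Bool :=
  PySem.Chars.startswith r "\\fonttbl".toList || PySem.Chars.startswith r "\\colortbl".toList ||
  PySem.Chars.startswith r "\\*".toList || PySem.Chars.startswith r "\\pntext".toList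

def stripSpecial : List Char → List Char
  | [] => []
  | c :: r =>
    if c = '{' ∧ isSpecial r then stripSpecial (skipB 0 r)
    else c :: stripSpecial r
  termination_by cs => cs.length
  decreasing_by
    · exact Nat.lt_succ_of_le (skipB_length_le _ _)
    · simp

-- membership in _CMDCHARS
def cmdCharB (c : Char) : Bool := c.isAlphanum || c = '-'

def loopB : List Char → List Char
  | [] => []
  | c :: r =>
    if c = '\\' then
      (if r.takeWhile cmdCharB = "par".toList then ['\n'] else []) ++ loopB (r.dropWhile cmdCharB)
    else if c = '{' ∨ c = '}' ∨ c = '\r' ∨ c = '\n' then loopB r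
    else c :: loopB r
  termination_by cs => cs.length
  decreasing_by
    · exact Nat.lt_succ_of_le (List.length_dropWhile_le _ _)
    · simp
    · simp

def parse_rtf_alt (s : String) : String :=
  let cleaned := stripSpecial s.toList
  let text := PySem.Chars.strip (loopB cleaned)
  String.ofList (PySem.Chars.join "\n".toList ((PySem.Chars.splitOn text "\n".toList).map PySem.Chars.strip))

-- ===== PRECONDITION & SPEC =====
def Spec_parse_rtf (s : String) (out : String) : Prop := out = parse_rtf_alt s
instance (s : String) (out : String) : Decidable (Spec_parse_rtf s out) := by unfold Spec_parse_rtf; infer_instance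

-- ===== CLAIM (what is proved, stated in full; the proofs are below) =====
def Claim_equal_parse_rtf : Prop := ∀ (s : String), Dom_parse_rtf s → Spec_parse_rtf s (parse_rtf s)

-- ===== LEMMAS AND PROOFS =====

theorem skipB_eq_skipA (d : Int) (x : List Char) : skipB d x = skipA d x := by
  induction x generalizing d with
  | nil => simp [skipA, skipB]
  | cons c r ih =>
    simp only [skipA, skipB]
    by_cases h : c = '}'
    · by_cases hd : d = 0 <;> simp [h, hd, ih]
    · by_cases hb : c = '{' <;> simp [h, hb, ih]

theorem skipA_append_no_brace (pref t : List Char) (d : Int)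
    (h : ∀ c ∈ pref, c ≠ '{' ∧ c ≠ '}') : skipA d (pref ++ t) = skipA d t := by
  induction pref generalizing d with
  | nil => rfl
  | cons c p ih =>
    have hc := h c (by simp)
    have h1 : ¬ (c = '}' ∧ d = 0) := fun hh => hc.2 hh.1
    rw [List.cons_append, skipA, if_neg h1, if_neg hc.2, if_neg hc.1]
    exact ih _ (fun c hc => h c (by simp [hc]))

theorem skipA_shape (d : Int) (x : List Char) :
    skipA d x = [] ∨ ∃ t, skipA d x = '}' :: t := by
  induction x generalizing d with
  | nil => left; rfl
  | cons c r ih =>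
    simp only [skipA]
    split
    · right; rename_i h; exact ⟨r, by rw [h.1]⟩
    · exact ih _

-- if P (brace-free) is a prefix of r, the skip from r equals the skip from after P
theorem spec_skip (P r : List Char) (hP : ∀ c ∈ P, c ≠ '{' ∧ c ≠ '}')
    (h : PySem.Chars.startswith r P = true) : skipA 0 r = skipA 0 (r.drop P.length) := by
  obtain ⟨t, ht⟩ := (PySem.Chars.startswith_iff r P).mp h
  subst ht
  rw [List.drop_left, skipA_append_no_brace P t 0 hP]

theorem cmdCharB_eq : cmdCharB = cmdCharA := by
  funext c
  simp [cmdCharA, cmdCharB, Char.isAlphanum, Bool.or_assoc]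

theorem stripSpecial_cons_ne (c : Char) (r : List Char) (h : ¬ (c = '{' ∧ isSpecial r)) :
    stripSpecial (c :: r) = c :: stripSpecial r := by
  rw [stripSpecial, if_neg h]

-- stripSpecial copies a command-character run verbatim, and the first char it
-- emits after the run (if any) is again a non-command char
theorem stripSpecial_cmd_run (r : List Char) :
    (stripSpecial r).takeWhile cmdCharA = r.takeWhile cmdCharA ∧
    (stripSpecial r).dropWhile cmdCharA = stripSpecial (r.dropWhile cmdCharA) := by
  induction r with
  | nil => simp [stripSpecial]
  | cons c r ih =>
    by_cases hc : cmdCharA c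
    · have hne : ¬ (c = '{' ∧ isSpecial r) := by
        rintro ⟨h1, _⟩; rw [h1] at hc; simp [cmdCharA] at hc
      rw [stripSpecial_cons_ne c r hne]
      simp only [List.takeWhile_cons, List.dropWhile_cons, hc, if_true, ih.1, ih.2, and_self]
    · have hcf : cmdCharA c = false := by simpa using hc
      have htake : (c :: r).takeWhile cmdCharA = [] := by simp [hcf]
      have hdrop : (c :: r).dropWhile cmdCharA = c :: r := by simp [hcf]
      rw [htake, hdrop]
      have hshape : stripSpecial (c :: r) = [] ∨
          ∃ d y, stripSpecial (c :: r) = d :: y ∧ cmdCharA d = false := by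
        by_cases hb : c = '{' ∧ isSpecial r
        · rw [stripSpecial, if_pos hb, skipB_eq_skipA]
          rcases skipA_shape 0 r with h | ⟨t, h⟩
          · left; rw [h, stripSpecial]
          · rw [h, stripSpecial_cons_ne '}' t (by rintro ⟨h2, _⟩; exact absurd h2 (by decide))]
            right; exact ⟨'}', _, rfl, by decide⟩
        · rw [stripSpecial_cons_ne c r hb]
          right; exact ⟨c, _, rfl, hcf⟩
      rcases hshape with h | ⟨d, y, h, hd⟩ <;> rw [h]
      · simp
      · simp [hd]

theorem main_lemma : ∀ n (cs : List Char), cs.length ≤ n → ∀ out,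
    loopA out cs = out ++ loopB (stripSpecial cs) := by
  intro n
  induction n with
  | zero =>
    intro cs hcs out
    have : cs = [] := List.length_eq_zero_iff.mp (Nat.le_zero.mp hcs)
    subst this
    simp [loopA, stripSpecial, loopB]
  | succ n ih =>
    intro cs hcs out
    match cs with
    | [] => simp [loopA, stripSpecial, loopB]
    | c :: r =>
      have hr : r.length ≤ n := by simpa using hcs
      by_cases hbrace : c = '{'
      · subst hbrace
        by_cases h1 : PySem.Chars.startswith r "\\fonttbl".toList
        · have hsp : isSpecial r := by unfold isSpecial; rw [h1]; simp
          have hk : skipA 0 r = skipA 0 (r.drop 8) := spec_skip _ r (by intro c hc; constructor <;> rintro rfl <;> simp at hc) h1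
          rw [loopA, if_pos rfl, if_pos h1,
              stripSpecial, if_pos ⟨rfl, hsp⟩, skipB_eq_skipA, hk]
          exact ih _ (le_trans (skipA_drop_len _ _ _) hr) out
        · by_cases h2 : PySem.Chars.startswith r "\\colortbl".toList
          · have hsp : isSpecial r := by unfold isSpecial; rw [h2]; simp
            have hk : skipA 0 r = skipA 0 (r.drop 9) := spec_skip _ r (by intro c hc; constructor <;> rintro rfl <;> simp at hc) h2
            rw [loopA, if_pos rfl, if_neg h1, if_pos h2,
                stripSpecial, if_pos ⟨rfl, hsp⟩, skipB_eq_skipA, hk]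
            exact ih _ (le_trans (skipA_drop_len _ _ _) hr) out
          · by_cases h3 : PySem.Chars.startswith r "\\*".toList
            · have hsp : isSpecial r := by unfold isSpecial; rw [h3]; simp
              have hk : skipA 0 r = skipA 0 (r.drop 2) := spec_skip _ r (by intro c hc; constructor <;> rintro rfl <;> simp at hc) h3
              rw [loopA, if_pos rfl, if_neg h1, if_neg h2, if_pos h3,
                  stripSpecial, if_pos ⟨rfl, hsp⟩, skipB_eq_skipA, hk]
              exact ih _ (le_trans (skipA_drop_len _ _ _) hr) out
            · by_cases h4 : PySem.Chars.startswith r "\\pntext".toList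
              · have hsp : isSpecial r := by unfold isSpecial; rw [h4]; simp
                have hk : skipA 0 r = skipA 0 (r.drop 7) := spec_skip _ r (by intro c hc; constructor <;> rintro rfl <;> simp at hc) h4
                rw [loopA, if_pos rfl, if_neg h1, if_neg h2,
                    if_neg h3, if_pos h4,
                    stripSpecial, if_pos ⟨rfl, hsp⟩, skipB_eq_skipA, hk]
                exact ih _ (le_trans (skipA_drop_len _ _ _) hr) out
              · have hsp : ¬ ('{' = '{' ∧ isSpecial r) := by
                  rintro ⟨_, hx⟩
                  simp only [isSpecial, Bool.or_eq_true] at hx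
                  rcases hx with ((hx | hx) | hx) | hx
                  exacts [h1 hx, h2 hx, h3 hx, h4 hx]
                rw [loopA, if_pos rfl, if_neg h1, if_neg h2,
                    if_neg h3, if_neg h4,
                    stripSpecial_cons_ne _ _ hsp, loopB, if_neg (by decide),
                    if_pos (by left; rfl)]
                exact ih r hr out
      · have hguard : ¬ (c = '{' ∧ isSpecial r) := fun hh => hbrace hh.1
        rw [stripSpecial_cons_ne c r hguard]
        by_cases hclose : c = '}'
        · subst hclose
          rw [loopA, if_neg (by decide), if_pos rfl, loopB, if_neg (by decide),
              if_pos (by right; left; rfl)]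
          exact ih r hr out
        · by_cases hcmd : c = '\\'
          · subst hcmd
            rw [loopA, if_neg (by decide), if_neg (by decide), if_pos rfl,
                loopB, if_pos rfl, cmdCharB_eq,
                (stripSpecial_cmd_run r).1, (stripSpecial_cmd_run r).2,
                ih _ (le_trans (List.length_dropWhile_le _ _) hr)]
            split <;> simp
          · by_cases hws : c = '\r' ∨ c = '\n'
            · rw [loopA, if_neg hbrace, if_neg hclose, if_neg hcmd, if_pos hws,
                  loopB, if_neg hcmd, if_pos (by tauto)]
              exact ih r hr out
            · rw [loopA, if_neg hbrace, if_neg hclose, if_neg hcmd, if_neg hws,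
                  loopB, if_neg hcmd, if_neg (by tauto),
                  ih _ hr]
              simp

-- ===== VERDICT (by name: the statement is the Claim_ definition above) =====
theorem parse_rtf_spec : Claim_equal_parse_rtf := by
  intro s _
  unfold Spec_parse_rtf parse_rtf parse_rtf_alt
  rw [main_lemma (s.toList.length) s.toList (le_refl _) []]
  rfl
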